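-- pv_equiv track=rewrite | github.com/weichengzhou/eDMS | core/admin/fields.py | remove_tuple_element
-- ===== SOURCE A (Python) =====
-- from typing import Tuple
--
-- def remove_tuple_element(origin_tuple: Tuple, remove_tuple: Tuple
--     ) -> Tuple:
--     temp_element = list(origin_tuple)
--     """
--     :param origin_tuple:
--     :param append_tuple:
--     :return Tuple:
--     """
--     temp_element = list(origin_tuple)
--     for field in remove_tuple:
--         if field in temp_element:
--             temp_element.remove(field)
--     return temp_element
-- ===== SOURCE B (Python) =====
-- def remove_tuple_element(origin_tuple, remove_tuple):
--     # One pass: count removals per value, then filter origin, skipping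
--     # an element while its removal budget is positive.
--     counts = {}
--     for field in remove_tuple:
--         counts[field] = counts.get(field, 0) + 1
--     result = []
--     for x in origin_tuple:
--         c = counts.get(x, 0)
--         if c > 0:
--             counts[x] = c - 1
--         else:
--             result.append(x)
--     return result
-- ===== Notes on version B (the rewrite author's own statement) =====
-- stated objective: faster
-- what changed: Instead of repeatedly scanning and mutating the origin list (membership test + list.remove per removal), B builds a dict of removal counts once and makes a single pass over origin, skipping each element while its removal budget is positive.
import Mathlib
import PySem

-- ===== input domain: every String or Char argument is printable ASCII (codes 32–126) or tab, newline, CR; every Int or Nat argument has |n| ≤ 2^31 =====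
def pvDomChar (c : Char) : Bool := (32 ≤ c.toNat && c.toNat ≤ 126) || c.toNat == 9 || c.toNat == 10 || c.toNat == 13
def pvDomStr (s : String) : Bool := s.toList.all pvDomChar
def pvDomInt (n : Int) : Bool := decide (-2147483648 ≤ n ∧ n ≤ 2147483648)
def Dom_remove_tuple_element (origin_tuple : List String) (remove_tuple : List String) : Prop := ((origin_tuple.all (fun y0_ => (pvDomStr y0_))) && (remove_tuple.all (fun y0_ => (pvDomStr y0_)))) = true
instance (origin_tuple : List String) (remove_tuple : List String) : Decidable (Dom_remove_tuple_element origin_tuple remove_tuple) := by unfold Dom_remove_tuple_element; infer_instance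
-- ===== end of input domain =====

-- B replaces A's per-removal scan-and-remove of the origin list by a removal-count
-- dict built once plus a single filtering pass over origin (objective: faster).
-- Note: Python A returns a LIST (despite the Tuple annotation); both ports return List String.

-- ===== PORT A =====
-- for field in remove_tuple: if field in temp: temp.remove(field)
def remove_tuple_element (origin_tuple : List String) (remove_tuple : List String) : List String :=
  remove_tuple.foldl
    (fun temp field =>
      if field ∈ temp then (PySem.List.remove? temp field).getD temp else temp)
    origin_tuple

-- ===== PORT B =====
-- counts[f] = counts.get(f,0)+1 over remove_tuple; then one filtering pass over origin_tuple
def remove_tuple_element_alt (origin_tuple : List String) (remove_tuple : List String) : List String :=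
  let counts : PySem.Dict String Int :=
    remove_tuple.foldl (fun d field => d.insert field (d.getD field 0 + 1)) PySem.Dict.empty
  (origin_tuple.foldl
    (fun (st : PySem.Dict String Int × List String) x =>
      let c := st.1.getD x 0
      if c > 0 then (st.1.insert x (c - 1), st.2) else (st.1, st.2 ++ [x]))
    (counts, [])).2

-- ===== PRECONDITION & SPEC =====
def Spec_remove_tuple_element (origin_tuple : List String) (remove_tuple : List String) (out : List String) : Prop := out = remove_tuple_element_alt origin_tuple remove_tuple
instance (origin_tuple : List String) (remove_tuple : List String) (out : List String) : Decidable (Spec_remove_tuple_element origin_tuple remove_tuple out) := by unfold Spec_remove_tuple_element; infer_instance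

-- ===== CLAIM (what is proved, stated in full; the proofs are below) =====
def Claim_equal_remove_tuple_element : Prop := ∀ (origin_tuple : List String) (remove_tuple : List String), Dom_remove_tuple_element origin_tuple remove_tuple → Spec_remove_tuple_element origin_tuple remove_tuple (remove_tuple_element origin_tuple remove_tuple)

-- ===== LEMMAS AND PROOFS =====

-- Reference function: filter `xs`, skipping the first `c v` occurrences of each value v.
def pvFC (c : String → Nat) : List String → List String
  | [] => []
  | x :: xs => if 0 < c x then pvFC (fun w => if w = x then c w - 1 else c w) xs
               else x :: pvFC c xs

-- A's per-field step, named for the proofs.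
def pvRmF (xs : List String) (v : String) : List String :=
  if v ∈ xs then (PySem.List.remove? xs v).getD xs else xs

lemma pvFC_bump (xs : List String) (c : String → Nat) (v : String) :
    pvFC (fun w => if w = v then c w + 1 else c w) xs = pvFC c (pvRmF xs v) := by
  induction xs generalizing c with
  | nil => simp [pvRmF, pvFC]
  | cons x xs ih =>
    by_cases hxv : x = v
    · subst hxv
      have hrm : pvRmF (x :: xs) x = xs := by
        simp [pvRmF]
      rw [hrm]
      simp only [pvFC, if_true]
      rw [if_pos (Nat.succ_pos (c x))]
      congr 1
      funext w
      by_cases hw : w = x <;> simp [hw]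
    · have hrm : pvRmF (x :: xs) v = x :: pvRmF xs v := by
        unfold pvRmF
        by_cases hv : v ∈ xs
        · have hvx : v ∈ x :: xs := List.mem_cons_of_mem _ hv
          rw [if_pos hvx, if_pos hv, PySem.List.remove?_cons_of_ne xs hxv,
              PySem.List.remove?_eq_some_erase xs v hv]
          rfl
        · have hvx : v ∉ x :: xs := by
            intro h
            rcases List.mem_cons.mp h with h1 | h2
            · exact hxv h1.symm
            · exact hv h2
          rw [if_neg hvx, if_neg hv]
      rw [hrm]
      simp only [pvFC]
      rw [show (if x = v then c x + 1 else c x) = c x from if_neg hxv]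
      by_cases hcx : 0 < c x
      · rw [if_pos hcx, if_pos hcx]
        rw [show (fun w => if w = x then (if w = v then c w + 1 else c w) - 1
                  else (if w = v then c w + 1 else c w))
              = (fun w => if w = v then (if w = x then c w - 1 else c w) + 1
                  else (if w = x then c w - 1 else c w)) from ?_, ih]
        funext w
        by_cases hw1 : w = x <;> by_cases hw2 : w = v <;> simp_all
      · rw [if_neg hcx, if_neg hcx, ih]

lemma pvA_eq_pvFC (r : List String) (o : List String) :
    remove_tuple_element o r = pvFC (fun v => r.count v) o := by
  induction r generalizing o with
  | nil =>
    have h0 : ∀ o, pvFC (fun _ => 0) o = o := by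
      intro o; induction o with
      | nil => rfl
      | cons x xs ih => simp [pvFC, ih]
    simpa [remove_tuple_element] using (h0 o).symm
  | cons f rest ih =>
    show List.foldl _ (pvRmF o f) rest = _
    rw [show List.foldl
        (fun temp field => if field ∈ temp then (PySem.List.remove? temp field).getD temp else temp)
        (pvRmF o f) rest = remove_tuple_element (pvRmF o f) rest from rfl, ih]
    rw [← pvFC_bump o (fun v => rest.count v) f]
    congr 1
    funext v
    by_cases hv : v = f
    · simp [hv]
    · simp [hv, Ne.symm hv]

lemma pvCounts_getD (r : List String) (d : PySem.Dict String Int) (v : String) :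
    (r.foldl (fun d field => d.insert field (d.getD field 0 + 1)) d).getD v 0
      = d.getD v 0 + r.count v := by
  induction r generalizing d with
  | nil => simp
  | cons f rest ih =>
    simp only [List.foldl_cons, ih, PySem.Dict.getD_insert, List.count_cons]
    by_cases hv : v = f
    · simp [hv]; omega
    · simp [hv, Ne.symm hv]

lemma pvB_loop (o : List String) (d : PySem.Dict String Int) (c : String → Nat)
    (acc : List String) (hinv : ∀ v, d.getD v 0 = (c v : Int)) :
    (o.foldl
      (fun (st : PySem.Dict String Int × List String) x =>
        let cc := st.1.getD x 0
        if cc > 0 then (st.1.insert x (cc - 1), st.2) else (st.1, st.2 ++ [x]))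
      (d, acc)).2 = acc ++ pvFC c o := by
  induction o generalizing d c acc with
  | nil => simp [pvFC]
  | cons x xs ih =>
    simp only [List.foldl_cons, pvFC]
    by_cases hcx : 0 < c x
    · have hgt : d.getD x 0 > 0 := by rw [hinv x]; exact_mod_cast hcx
      rw [if_pos hcx]
      simp only [hgt, if_pos]
      rw [ih (d.insert x (d.getD x 0 - 1)) (fun w => if w = x then c w - 1 else c w) acc ?_]
      intro v
      rw [PySem.Dict.getD_insert]
      by_cases hv : v = x
      · subst hv; simp [hinv v]; omega
      · simp [hv, hinv v]
    · have hng : ¬ d.getD x 0 > 0 := by rw [hinv x]; exact_mod_cast hcx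
      rw [if_neg hcx]
      simp only [hng, if_false]
      rw [ih d c (acc ++ [x]) hinv]
      simp

lemma pvB_eq_pvFC (o r : List String) :
    remove_tuple_element_alt o r = pvFC (fun v => r.count v) o := by
  unfold remove_tuple_element_alt
  rw [pvB_loop o _ (fun v => r.count v) []]
  · simp
  · intro v
    rw [pvCounts_getD]
    simp

-- ===== VERDICT (by name: the statement is the Claim_ definition above) =====
theorem remove_tuple_element_spec : Claim_equal_remove_tuple_element := by
  intro o r _
  unfold Spec_remove_tuple_element
  rw [pvA_eq_pvFC, pvB_eq_pvFC]
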